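-- pv_equiv track=rewrite | github.com/mkrtmkm/Repo | Lab projects/Lab09/mokrytskyi_9.09.py | find_most_popular
-- ===== SOURCE A (Python) =====
-- def find_most_popular(votes):
--     count = {}
--     for num in votes:
--         if num in count:
--             count[num] += 1
--         else:
--             count[num] = 1
--
--     max_frequency = max(count.values())
--     candidates = {num for num, freq in count.items() if freq == max_frequency}
--     return min(candidates)
-- ===== SOURCE B (Python) =====
-- def find_most_popular(votes):
--     best_v, best_c = votes[0], 0
--     for v in votes:
--         c = votes.count(v)
--         if c > best_c or (c == best_c and v < best_v):
--             best_v, best_c = v, c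
--     return best_v
-- ===== Notes on version B (the rewrite author's own statement) =====
-- stated objective: alternative
-- what changed: Replaces the dict frequency table plus three-pass selection (max of values, candidate set comprehension, min) with a single running-best scan over the votes that recomputes each value's frequency with list.count and keeps the (highest-count, smallest-value) leader.
import Mathlib
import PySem

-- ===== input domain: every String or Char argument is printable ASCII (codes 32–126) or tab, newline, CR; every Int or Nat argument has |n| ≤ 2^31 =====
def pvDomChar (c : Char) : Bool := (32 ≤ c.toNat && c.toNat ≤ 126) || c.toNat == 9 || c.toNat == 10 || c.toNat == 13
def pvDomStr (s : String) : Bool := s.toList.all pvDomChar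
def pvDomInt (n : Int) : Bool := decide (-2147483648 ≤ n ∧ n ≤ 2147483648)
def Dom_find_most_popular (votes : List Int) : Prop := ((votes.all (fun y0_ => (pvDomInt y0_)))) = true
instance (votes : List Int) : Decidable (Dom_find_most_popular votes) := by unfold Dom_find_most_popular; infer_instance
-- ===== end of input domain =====

-- B replaces A's dict counting + three-pass selection with one running-best scan using list.count (alternative decomposition, not faster).


-- ===== PORT A =====
def find_most_popular (votes : List Int) : Int :=
  let count : PySem.Dict Int Int := votes.foldl (fun d num =>
    if d.contains num then d.insert num (d.getD num 0 + 1) else d.insert num 1)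
    PySem.Dict.empty
  match PySem.List.max? count.values (fun x => x) with
  | none => 0  -- max() on an empty dict: ValueError, excluded by Pre_
  | some max_frequency =>
    let candidates : PySem.Set Int :=
      PySem.Set.ofList ((count.items.filter (fun p => p.2 == max_frequency)).map (·.1))
    match PySem.List.min? candidates (fun x => x) with
    | none => 0  -- unreachable when the dict is nonempty
    | some m => m

-- ===== PORT B =====
-- loop body of B: update the (best value, best count) pair with vote v
def bStep (votes : List Int) (b : Int × Int) (v : Int) : Int × Int :=
  let c : Int := (votes.count v : Int)
  if c > b.2 ∨ (c = b.2 ∧ v < b.1) then (v, c) else b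

def find_most_popular_alt (votes : List Int) : Int :=
  match votes with
  | [] => 0  -- indexing the first element of an empty list: IndexError, excluded by Pre_
  | v0 :: _ => (votes.foldl (bStep votes) (v0, 0)).1

-- ===== PRECONDITION & SPEC =====
-- Pre_ excludes only the empty list, on which both Pythons raise (A: ValueError from max(), B: IndexError from indexing the first element).
def Pre_find_most_popular (votes : List Int) : Prop := votes ≠ []
instance (votes : List Int) : Decidable (Pre_find_most_popular votes) := by unfold Pre_find_most_popular; infer_instance
def pvWitness_find_most_popular : List Int := ([1, 2, 2, 3])
def Spec_find_most_popular (votes : List Int) (out : Int) : Prop := out = find_most_popular_alt votes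
instance (votes : List Int) (out : Int) : Decidable (Spec_find_most_popular votes out) := by unfold Spec_find_most_popular; infer_instance

-- ===== CLAIM (what is proved, stated in full; the proofs are below) =====
def Claim_equal_find_most_popular : Prop := ∀ (votes : List Int), Dom_find_most_popular votes → Pre_find_most_popular votes → Spec_find_most_popular votes (find_most_popular votes)

-- ===== LEMMAS AND PROOFS =====

/-- The common characterisation: `m` is the smallest among the most frequent values of `votes`. -/
def IsBest (votes : List Int) (m : Int) : Prop :=
  m ∈ votes ∧ ∀ v ∈ votes, votes.count v < votes.count m ∨ (votes.count v = votes.count m ∧ m ≤ v)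

theorem isBest_unique (votes : List Int) (a b : Int) (ha : IsBest votes a) (hb : IsBest votes b) :
    a = b := by
  obtain ⟨hma, ha⟩ := ha
  obtain ⟨hmb, hb⟩ := hb
  rcases ha b hmb with h | ⟨h1, h2⟩ <;> rcases hb a hma with h' | ⟨h1', h2'⟩ <;> omega

/-- one `bStep` preserves the "already beaten" property of any value `u`. -/
theorem bStep_mono (votes : List Int) (b : Int × Int) (x u : Int)
    (hu : (votes.count u : Int) < b.2 ∨ ((votes.count u : Int) = b.2 ∧ b.1 ≤ u)) :
    (votes.count u : Int) < (bStep votes b x).2 ∨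
      ((votes.count u : Int) = (bStep votes b x).2 ∧ (bStep votes b x).1 ≤ u) := by
  simp only [bStep]
  split_ifs with h
  · dsimp only
    rcases h with h | ⟨h1, h2⟩ <;> rcases hu with hu | ⟨hu1, hu2⟩ <;> omega
  · exact hu

/-- after `bStep votes b x`, `x` itself is beaten. -/
theorem bStep_self (votes : List Int) (b : Int × Int) (x : Int) :
    (votes.count x : Int) < (bStep votes b x).2 ∨
      ((votes.count x : Int) = (bStep votes b x).2 ∧ (bStep votes b x).1 ≤ x) := by
  simp only [bStep]
  split_ifs with h
  · right; exact ⟨rfl, le_refl x⟩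
  · rcases not_or.1 h with ⟨h1, h2⟩
    by_cases hc : (votes.count x : Int) = b.2
    · have h3 : ¬ x < b.1 := fun hlt => h2 ⟨hc, hlt⟩
      right; exact ⟨hc, by omega⟩
    · left; omega

theorem bStep_fst_mem (votes : List Int) (b : Int × Int) (x : Int)
    (hx : x ∈ votes) (hb : b.1 ∈ votes) : (bStep votes b x).1 ∈ votes := by
  simp only [bStep]; split_ifs <;> simp [hx, hb]

theorem bStep_snd (votes : List Int) (b : Int × Int) (x : Int)
    (hb : b.2 = (votes.count b.1 : Int) ∨ b.2 = 0) :
    (bStep votes b x).2 = (votes.count (bStep votes b x).1 : Int) ∨ (bStep votes b x).2 = 0 := by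
  simp only [bStep]; split_ifs <;> simp [hb]

/-- invariant of B's fold. -/
theorem B_fold_inv (votes : List Int) (l : List Int) :
    ∀ (b : Int × Int), (∀ v ∈ l, v ∈ votes) → b.1 ∈ votes →
    (b.2 = (votes.count b.1 : Int) ∨ b.2 = 0) →
    (l.foldl (bStep votes) b).1 ∈ votes ∧
    ((l.foldl (bStep votes) b).2 = (votes.count (l.foldl (bStep votes) b).1 : Int) ∨
      (l.foldl (bStep votes) b).2 = 0) ∧
    (∀ v ∈ l, (votes.count v : Int) < (l.foldl (bStep votes) b).2 ∨
      ((votes.count v : Int) = (l.foldl (bStep votes) b).2 ∧ (l.foldl (bStep votes) b).1 ≤ v)) ∧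
    (∀ u : Int, ((votes.count u : Int) < b.2 ∨ ((votes.count u : Int) = b.2 ∧ b.1 ≤ u)) →
      ((votes.count u : Int) < (l.foldl (bStep votes) b).2 ∨
        ((votes.count u : Int) = (l.foldl (bStep votes) b).2 ∧ (l.foldl (bStep votes) b).1 ≤ u))) := by
  induction l with
  | nil =>
    intro b _ h1 h2
    exact ⟨h1, h2, by simp, fun u h => h⟩
  | cons x l' ih =>
    intro b hl h1 h2
    have hx : x ∈ votes := hl x (by simp)
    simp only [List.foldl_cons]
    obtain ⟨r1, r2, r3, r4⟩ := ih (bStep votes b x) (fun v hv => hl v (by simp [hv]))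
      (bStep_fst_mem votes b x hx h1) (bStep_snd votes b x h2)
    refine ⟨r1, r2, ?_, fun u hu => r4 u (bStep_mono votes b x u hu)⟩
    intro v hv
    rcases List.mem_cons.1 hv with rfl | hv'
    · exact r4 v (bStep_self votes b v)
    · exact r3 v hv'

theorem B_isBest (votes : List Int) (hne : votes ≠ []) :
    IsBest votes (find_most_popular_alt votes) := by
  obtain ⟨v0, rest, rfl⟩ := List.exists_cons_of_ne_nil hne
  simp only [find_most_popular_alt]
  obtain ⟨r1, r2, r3, _⟩ := B_fold_inv (v0 :: rest) (v0 :: rest) (v0, 0)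
    (fun v hv => hv) (by simp) (by simp)
  set r := List.foldl (bStep (v0 :: rest)) (v0, 0) (v0 :: rest) with hr
  have hc1 : 0 < (v0 :: rest).count r.1 := List.count_pos_iff.2 r1
  have hr2 : r.2 = ((v0 :: rest).count r.1 : Int) := by
    rcases r2 with h | h
    · exact h
    · rcases r3 r.1 r1 with h3 | ⟨h3, _⟩ <;> omega
  refine ⟨r1, fun v hv => ?_⟩
  rcases r3 v hv with h | ⟨h1, h2⟩ <;> omega

theorem A_isBest (votes : List Int) (hne : votes ≠ []) :
    IsBest votes (find_most_popular votes) := by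
  -- the counting loop builds Counter(votes)
  have hcnt : votes.foldl (fun d num =>
      if d.contains num then d.insert num (d.getD num 0 + 1) else d.insert num 1)
      (PySem.Dict.empty : PySem.Dict Int Int) = PySem.Dict.counter votes := by
    rw [← PySem.Dict.foldl_insert_getD_add_one_eq_counter]
    apply PySem.List.foldl_congr_mem
    intro d num _
    by_cases h : d.contains num = true
    · simp [h]
    · have h' : d.contains num = false := by simpa using h
      simp [h', PySem.Dict.getD_of_not_contains]
  have hv : (PySem.Dict.counter votes).values
      = (PySem.Set.ofList votes).map (fun k => ((votes.count k : Int))) := by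
    rw [PySem.Dict.values_eq_map_keys _ (PySem.Dict.nodup_keys_counter votes) 0]
    simp [PySem.Dict.keys_counter, PySem.Dict.getD_counter]
  obtain ⟨v0, rest, hvr⟩ := List.exists_cons_of_ne_nil hne
  rcases hmax : PySem.List.max? ((PySem.Dict.counter votes).values) (fun x => x) with _ | M
  · exfalso
    have : (PySem.Dict.counter votes).values = [] := (PySem.List.max?_eq_none_iff _ _).1 hmax
    rw [hv] at this
    have hv0 : v0 ∈ PySem.Set.ofList votes := (PySem.Set.mem_ofList _ _).2 (by simp [hvr])
    simp only [List.map_eq_nil_iff] at this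
    simp [this] at hv0
  · have hMmem : M ∈ (PySem.Dict.counter votes).values := PySem.List.max?_mem hmax
    have hMmax : ∀ y ∈ (PySem.Dict.counter votes).values, y ≤ M := PySem.List.max?_isMax hmax
    have counts_le : ∀ v ∈ votes, (votes.count v : Int) ≤ M := by
      intro v hv'
      exact hMmax _ (by rw [hv]; exact List.mem_map_of_mem ((PySem.Set.mem_ofList _ _).2 hv'))
    obtain ⟨k0, hk0set, hk0⟩ : ∃ k0, k0 ∈ PySem.Set.ofList votes ∧ (votes.count k0 : Int) = M := by
      rw [hv] at hMmem
      obtain ⟨k0, hk0, hkeq⟩ := List.mem_map.1 hMmem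
      exact ⟨k0, hk0, hkeq⟩
    have hcand : ∀ x, x ∈ PySem.Set.ofList
        (((PySem.Dict.counter votes).items.filter (fun p => p.2 == M)).map (·.1))
        ↔ (x ∈ votes ∧ (votes.count x : Int) = M) := by
      intro x
      rw [PySem.Set.mem_ofList]
      simp only [PySem.Dict.items_counter, List.mem_map, List.mem_filter, beq_iff_eq]
      constructor
      · rintro ⟨⟨k, v⟩, ⟨⟨k', hk', hpair⟩, hfreq⟩, rfl⟩
        cases hpair
        exact ⟨(PySem.Set.mem_ofList _ _).1 hk', hfreq⟩
      · rintro ⟨hx, hfx⟩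
        exact ⟨(x, (votes.count x : Int)),
          ⟨⟨x, (PySem.Set.mem_ofList _ _).2 hx, rfl⟩, hfx⟩, rfl⟩
    rcases hmin : PySem.List.min? (PySem.Set.ofList
        (((PySem.Dict.counter votes).items.filter (fun p => p.2 == M)).map (·.1)))
        (fun x => x) with _ | m
    · exfalso
      have hempty := (PySem.List.min?_eq_none_iff _ _).1 hmin
      have hk0c : k0 ∈ PySem.Set.ofList
          (((PySem.Dict.counter votes).items.filter (fun p => p.2 == M)).map (·.1)) :=
        (hcand k0).2 ⟨(PySem.Set.mem_ofList _ _).1 hk0set, hk0⟩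
      simp [hempty] at hk0c
    · have hm : m ∈ votes ∧ (votes.count m : Int) = M :=
        (hcand m).1 (PySem.List.min?_mem hmin)
      have hmmin : ∀ y ∈ PySem.Set.ofList
          (((PySem.Dict.counter votes).items.filter (fun p => p.2 == M)).map (·.1)),
          m ≤ y := PySem.List.min?_isMin hmin
      have hres : find_most_popular votes = m := by
        simp only [find_most_popular, hcnt, hmax, hmin]
      rw [hres]
      refine ⟨hm.1, fun v hv' => ?_⟩
      have h1 : (votes.count v : Int) ≤ M := counts_le v hv'
      by_cases he : (votes.count v : Int) = M
      · have hle : m ≤ v := hmmin v ((hcand v).2 ⟨hv', he⟩)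
        right
        exact ⟨by omega, hle⟩
      · left
        have := hm.2
        omega

-- ===== VERDICT (by name: the statement is the Claim_ definition above) =====
theorem find_most_popular_spec : Claim_equal_find_most_popular := by
  intro votes _ hpre
  exact isBest_unique votes _ _ (A_isBest votes hpre) (B_isBest votes hpre)
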